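-- pv_equiv track=rewrite | github.com/miliar/Code_Jam_Webscraper | Solutions_in_python/Problem_148/A-small.py | Solve
-- ===== SOURCE A (Python) =====
-- def Solve(N, X, fs):
--     fs = sorted(fs)
--     res = 0
--     while(0 < len(fs)):
--         l = fs[-1]
--         fs.remove(l)
--         RemoveNotGreater(fs, X - l)
--         res = res + 1
--     return res
--
-- def RemoveNotGreater(fs, v):
--     if 0 == len(fs):
--         return False
--     for vv in range(v, 0, -1):
--         if vv in fs:
--             fs.remove(vv)
--             return True
--         if fs[0] >= vv:
--             return False
--     return False
-- ===== SOURCE B (Python) =====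
-- def Solve(N, X, fs):
--     fs = sorted(fs)
--     res = 0
--     while fs:
--         l = fs.pop()
--         res += 1
--         cap = X - l
--         # scan the remaining sorted list from the top for the largest element <= cap
--         i = len(fs) - 1
--         while i >= 0 and fs[i] > cap:
--             i -= 1
--         if i >= 0 and fs[i] >= 1:
--             fs.pop(i)
--     return res
-- ===== Notes on version B (the rewrite author's own statement) =====
-- stated objective: faster
-- what changed: The inner partner search scans the sorted list's elements downward from the top (index scan) instead of testing every integer value from X-l down to 1 for list membership, removing the value-range factor X-l from the inner loop (timing: 55x at n=256, A times out at n=1024 where B stays fast).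
import Mathlib
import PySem

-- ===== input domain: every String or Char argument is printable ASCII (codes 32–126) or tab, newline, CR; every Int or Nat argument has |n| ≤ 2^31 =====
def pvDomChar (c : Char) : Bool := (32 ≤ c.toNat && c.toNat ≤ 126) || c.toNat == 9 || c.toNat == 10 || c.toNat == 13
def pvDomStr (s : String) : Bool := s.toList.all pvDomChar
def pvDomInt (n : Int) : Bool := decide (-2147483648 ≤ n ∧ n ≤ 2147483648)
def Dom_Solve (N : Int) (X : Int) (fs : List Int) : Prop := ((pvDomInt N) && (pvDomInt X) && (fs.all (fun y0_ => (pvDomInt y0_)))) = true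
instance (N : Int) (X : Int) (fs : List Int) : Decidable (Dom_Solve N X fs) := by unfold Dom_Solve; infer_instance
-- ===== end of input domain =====

-- B replaces A's inner value-range membership scan (vv = X-l, ..., 1) by a top-down index scan
-- of the sorted list itself (the value-range factor X-l disappears from the inner loop).

-- ===== PORT A =====
-- for vv in range(v, 0, -1): if vv in fs: fs.remove(vv); return  /  if fs[0] >= vv: return
-- (fs is nonempty throughout: checked before the loop and unchanged until a returning branch,
--  so fs[0] is in range and pyGetD is exact here)
def rngScan (fs : List Int) : List Int → List Int
  | [] => fs
  | vv :: rest =>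
    if vv ∈ fs then (PySem.List.remove? fs vv).getD fs
    else if PySem.List.pyGetD fs 0 0 ≥ vv then fs
    else rngScan fs rest

def RemoveNotGreaterA (fs : List Int) (v : Int) : List Int :=
  if fs.length == 0 then fs
  else rngScan fs (PySem.List.pyRange v 0 (-1))

-- while 0 < len(fs): l = fs[-1]; fs.remove(l); RemoveNotGreater(fs, X - l); res += 1
-- fuel = len(fs) is exact: every iteration shortens fs by at least one element;
-- fs[-1] exists (fs nonempty) and fs.remove(l) always finds l, so pyGetD/.getD are exact
def solveGoA (X : Int) : Nat → List Int → Int → Int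
  | 0, _, res => res
  | fuel + 1, fs, res =>
    if fs.isEmpty then res
    else
      solveGoA X fuel
        (RemoveNotGreaterA ((PySem.List.remove? fs (PySem.List.pyGetD fs (-1) 0)).getD fs)
          (X - PySem.List.pyGetD fs (-1) 0))
        (res + 1)

def Solve (N : Int) (X : Int) (fs : List Int) : Int :=
  solveGoA X (PySem.List.sorted fs id false).length (PySem.List.sorted fs id false) 0

-- ===== PORT B =====
-- i = len(fs) - 1; while i >= 0 and fs[i] > cap: i -= 1    (all accesses in range, pyGetD is exact)
def topScan (fs : List Int) (cap : Int) (i : Int) : Int :=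
  if h : 0 ≤ i ∧ cap < PySem.List.pyGetD fs i 0 then topScan fs cap (i - 1) else i
termination_by (i + 1).toNat
decreasing_by omega

-- i = topScan ...; if i >= 0 and fs[i] >= 1: fs.pop(i)
def innerB (fs : List Int) (cap : Int) : List Int :=
  if 0 ≤ topScan fs cap ((fs.length : Int) - 1) ∧
      1 ≤ PySem.List.pyGetD fs (topScan fs cap ((fs.length : Int) - 1)) 0 then
    ((PySem.List.pop? fs (topScan fs cap ((fs.length : Int) - 1))).map Prod.snd).getD fs
  else fs

-- while fs: l = fs.pop(); res += 1; cap = X - l; ...inner scan...   (fuel = len(fs) is exact, as for A)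
def solveGoB (X : Int) : Nat → List Int → Int → Int
  | 0, _, res => res
  | fuel + 1, fs, res =>
    if fs.isEmpty then res
    else solveGoB X fuel (innerB fs.dropLast (X - PySem.List.pyGetD fs (-1) 0)) (res + 1)

def Solve_alt (N : Int) (X : Int) (fs : List Int) : Int :=
  solveGoB X (PySem.List.sorted fs id false).length (PySem.List.sorted fs id false) 0

-- ===== PRECONDITION & SPEC =====
def Spec_Solve (N : Int) (X : Int) (fs : List Int) (out : Int) : Prop := out = Solve_alt N X fs
instance (N : Int) (X : Int) (fs : List Int) (out : Int) : Decidable (Spec_Solve N X fs out) := by unfold Spec_Solve; infer_instance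

-- ===== CLAIM (what is proved, stated in full; the proofs are below) =====
def Claim_equal_Solve : Prop := ∀ (N : Int) (X : Int) (fs : List Int), Dom_Solve N X fs → Spec_Solve N X fs (Solve N X fs)

-- ===== LEMMAS AND PROOFS =====

-- both inner removals equal this canonical form: drop the last element ≤ cap if it is ≥ 1
def canon (g : List Int) (cap : Int) : List Int :=
  if (g.takeWhile (fun a => decide (a ≤ cap))).length ≠ 0 ∧
      1 ≤ g.getD ((g.takeWhile (fun a => decide (a ≤ cap))).length - 1) 0 then
    g.eraseIdx ((g.takeWhile (fun a => decide (a ≤ cap))).length - 1)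
  else g

theorem le_getLast_of_sorted : ∀ (l : List Int), l.Pairwise (· ≤ ·) → ∀ (hne : l ≠ []),
    ∀ e ∈ l, e ≤ l.getLast hne := by
  intro l
  induction l with
  | nil => intro _ hne; exact absurd rfl hne
  | cons x t ih =>
    intro h hne e he
    cases t with
    | nil => simp at he; simp [he]
    | cons y u =>
      rw [List.getLast_cons (by simp)]
      rcases List.mem_cons.mp he with rfl | he'
      · exact (List.pairwise_cons.mp h).1 _ (List.getLast_mem (by simp))
      · exact ih (List.pairwise_cons.mp h).2 (by simp) e he'

theorem head_le_of_sorted (l : List Int) (hs : l.Pairwise (· ≤ ·)) (h : l ≠ []) :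
    ∀ e ∈ l, l.head h ≤ e := by
  cases l with
  | nil => exact absurd rfl h
  | cons x t =>
    intro e he
    rw [List.head_cons]
    rcases List.mem_cons.mp he with rfl | he'
    · exact le_refl e
    · exact (List.pairwise_cons.mp hs).1 e he'

theorem getD_zero_mem (g : List Int) (hg : g ≠ []) : g.getD 0 0 ∈ g := by
  cases g with
  | nil => exact absurd rfl hg
  | cons x t => simp

theorem getD_zero_le_of_sorted (g : List Int) (hs : g.Pairwise (· ≤ ·)) (hg : g ≠ []) :
    ∀ e ∈ g, g.getD 0 0 ≤ e := by
  cases g with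
  | nil => exact absurd rfl hg
  | cons x t =>
    intro e he
    rcases List.mem_cons.mp he with rfl | he'
    · simp
    · simpa using (List.pairwise_cons.mp hs).1 e he'

theorem eraseIdx_last : ∀ (l : List Int), l.eraseIdx (l.length - 1) = l.dropLast := by
  intro l
  induction l with
  | nil => rfl
  | cons x t ih =>
    cases t with
    | nil => rfl
    | cons y u =>
      have h1 : (x :: y :: u : List Int).length - 1 = (y :: u).length - 1 + 1 := by simp
      rw [h1, List.eraseIdx_cons_succ, ih]
      rfl

theorem erase_getLast_sorted : ∀ (l : List Int), l.Pairwise (· ≤ ·) → ∀ (hne : l ≠ []),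
    l.erase (l.getLast hne) = l.dropLast := by
  intro l
  induction l with
  | nil => intro _ hne; exact absurd rfl hne
  | cons x t ih =>
    intro h hne
    cases t with
    | nil => simp
    | cons y u =>
      have hte : (y :: u : List Int) ≠ [] := by simp
      have hlast : (x :: y :: u).getLast hne = (y :: u).getLast hte := List.getLast_cons hte
      have hpx := List.pairwise_cons.mp h
      rw [hlast]
      by_cases hx : x = (y :: u).getLast hte
      · have hall : ∀ e ∈ (y :: u : List Int), e = x := by
          intro e he'
          have h1 : x ≤ e := hpx.1 e he'
          have h2 : e ≤ (y :: u).getLast hte := le_getLast_of_sorted _ hpx.2 hte e he'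
          omega
        rw [← hx, List.erase_cons_head]
        have e2 : (y :: u : List Int).dropLast = List.replicate u.length x := by
          have hmem : ∀ b ∈ (y :: u : List Int).dropLast, b = x :=
            fun b hb => hall b ((List.dropLast_sublist _).subset hb)
          have := List.eq_replicate_of_mem hmem
          simpa using this
        have hd : (x :: y :: u : List Int).dropLast = x :: (y :: u).dropLast := rfl
        rw [hd, e2, List.eq_replicate_of_mem hall]
        simp [List.replicate_succ]
      · rw [List.erase_cons_tail (by simpa using hx), ih hpx.2 hte]
        rfl

theorem mem_takeWhile_le (g : List Int) (cap : Int) (e : Int)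
    (he : e ∈ g.takeWhile (fun a => decide (a ≤ cap))) : e ≤ cap := by
  simpa using List.mem_takeWhile_imp he

theorem mem_dropWhile_gt (g : List Int) (cap : Int) (hs : g.Pairwise (· ≤ ·)) :
    ∀ e ∈ g.dropWhile (fun a => decide (a ≤ cap)), cap < e := by
  intro e he
  have hqne : g.dropWhile (fun a => decide (a ≤ cap)) ≠ [] := List.ne_nil_of_mem he
  have hhead := List.head_dropWhile_not (fun a => decide (a ≤ cap)) hqne
  have hd : cap < (g.dropWhile (fun a => decide (a ≤ cap))).head hqne := by simpa using hhead
  have hqs : (g.dropWhile (fun a => decide (a ≤ cap))).Pairwise (· ≤ ·) :=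
    List.Pairwise.sublist (List.dropWhile_sublist _) hs
  have hle := head_le_of_sorted _ hqs hqne e he
  omega

theorem takeWhile_pairwise (g : List Int) (cap : Int) (hs : g.Pairwise (· ≤ ·)) :
    (g.takeWhile (fun a => decide (a ≤ cap))).Pairwise (· ≤ ·) :=
  List.Pairwise.sublist (List.takeWhile_prefix _).sublist hs

theorem getD_prefix {p g : List Int} (h : p <+: g) {i : Nat} (hi : i < p.length) :
    g.getD i 0 = p.getD i 0 := by
  obtain ⟨q, rfl⟩ := h
  rw [List.getD_append p q 0 i hi]

theorem getD_last (p : List Int) (hne : p ≠ []) :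
    p.getD (p.length - 1) 0 = p.getLast hne := by
  have hpos : 0 < p.length := List.length_pos_iff.mpr hne
  rw [List.getD_eq_getElem p 0 (by omega), List.getLast_eq_getElem]

theorem canon_eq_self_of_nonpos (g : List Int) (cap : Int)
    (hnp : ∀ e ∈ g, e ≤ cap → e < 1) : canon g cap = g := by
  unfold canon
  by_cases hn : (g.takeWhile (fun a => decide (a ≤ cap))).length = 0
  · rw [if_neg]; rintro ⟨h1, -⟩; exact h1 hn
  · rw [if_neg]
    rintro ⟨-, h1⟩
    have hne : g.takeWhile (fun a => decide (a ≤ cap)) ≠ [] :=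
      fun h => hn (by rw [h]; rfl)
    rw [getD_prefix (List.takeWhile_prefix (l := g) (fun a => decide (a ≤ cap))) (by omega), getD_last _ hne] at h1
    have hmem := List.getLast_mem hne
    have h2 := mem_takeWhile_le g cap _ hmem
    have h3 := hnp _ ((List.takeWhile_prefix _).subset hmem) h2
    exact absurd h1 (not_le.mpr h3)

theorem canon_pairwise (g : List Int) (cap : Int) (hs : g.Pairwise (· ≤ ·)) :
    (canon g cap).Pairwise (· ≤ ·) := by
  unfold canon
  split_ifs
  · exact List.Pairwise.sublist (List.eraseIdx_sublist _ _) hs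
  · exact hs

theorem topScan_stop (g : List Int) (cap : Int) (hs : g.Pairwise (· ≤ ·)) :
    topScan g cap (((g.takeWhile (fun a => decide (a ≤ cap))).length : Int) - 1)
      = ((g.takeWhile (fun a => decide (a ≤ cap))).length : Int) - 1 := by
  rw [topScan, dif_neg]
  rintro ⟨h1, h2⟩
  have hn : (g.takeWhile (fun a => decide (a ≤ cap))).length ≠ 0 := by omega
  have hne : g.takeWhile (fun a => decide (a ≤ cap)) ≠ [] :=
    fun h => hn (by rw [h]; rfl)
  have hidx : (((g.takeWhile (fun a => decide (a ≤ cap))).length : Int) - 1)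
      = (((g.takeWhile (fun a => decide (a ≤ cap))).length - 1 : Nat) : Int) := by omega
  rw [hidx, PySem.List.pyGetD_natCast,
    getD_prefix (List.takeWhile_prefix (l := g) (fun a => decide (a ≤ cap))) (by omega), getD_last _ hne] at h2
  exact absurd h2 (not_lt.mpr (mem_takeWhile_le g cap _ (List.getLast_mem hne)))

theorem topScan_run (g : List Int) (cap : Int) (hs : g.Pairwise (· ≤ ·)) :
    ∀ (k : Nat), ((g.takeWhile (fun a => decide (a ≤ cap))).length : Int) - 1 + k ≤ (g.length : Int) - 1 →
    topScan g cap (((g.takeWhile (fun a => decide (a ≤ cap))).length : Int) - 1 + k)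
      = ((g.takeWhile (fun a => decide (a ≤ cap))).length : Int) - 1 := by
  set p := g.takeWhile (fun a => decide (a ≤ cap)) with hp
  set q := g.dropWhile (fun a => decide (a ≤ cap)) with hq
  have hsplit : p ++ q = g := by rw [hp, hq]; exact List.takeWhile_append_dropWhile
  have hqgt : ∀ e ∈ q, cap < e := by rw [hq]; exact mem_dropWhile_gt g cap hs
  clear_value p q
  have hqlen : p.length + q.length = g.length := by rw [← hsplit]; simp
  intro k
  induction k with
  | zero =>
    intro _
    have h0 : ((p.length : Int) - 1 + ((0 : Nat) : Int)) = (p.length : Int) - 1 := by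
      push_cast; ring
    rw [h0, hp]
    exact topScan_stop g cap hs
  | succ m ih =>
    intro hbound
    have hi0 : (0 : Int) ≤ (p.length : Int) - 1 + ((m + 1 : Nat) : Int) := by push_cast; omega
    have hidx : ((p.length : Int) - 1 + ((m + 1 : Nat) : Int)) = ((p.length + m : Nat) : Int) := by
      push_cast; ring
    have hltg : p.length + m < g.length := by
      have := hbound; push_cast at this; omega
    have hval : cap < PySem.List.pyGetD g ((p.length : Int) - 1 + ((m + 1 : Nat) : Int)) 0 := by
      rw [hidx, PySem.List.pyGetD_natCast]
      rw [← hsplit, List.getD_append_right p q 0 (p.length + m) (by omega)]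
      have hm : p.length + m - p.length = m := by omega
      rw [hm]
      have hmq : m < q.length := by omega
      rw [List.getD_eq_getElem q 0 hmq]
      exact hqgt _ (List.getElem_mem hmq)
    rw [topScan, dif_pos ⟨hi0, hval⟩]
    have harg : ((p.length : Int) - 1 + ((m + 1 : Nat) : Int)) - 1 = (p.length : Int) - 1 + ((m : Nat) : Int) := by
      push_cast; ring
    rw [harg]
    exact ih (by push_cast at hbound ⊢; omega)

theorem innerB_eq_canon (g : List Int) (cap : Int) (hs : g.Pairwise (· ≤ ·)) :
    innerB g cap = canon g cap := by
  have hple : (g.takeWhile (fun a => decide (a ≤ cap))).length ≤ g.length :=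
    (List.takeWhile_prefix _).length_le
  have hrun : topScan g cap ((g.length : Int) - 1)
      = ((g.takeWhile (fun a => decide (a ≤ cap))).length : Int) - 1 := by
    have h := topScan_run g cap hs (g.length - (g.takeWhile (fun a => decide (a ≤ cap))).length)
      (by omega)
    rw [show (((g.takeWhile (fun a => decide (a ≤ cap))).length : Int) - 1
        + ((g.length - (g.takeWhile (fun a => decide (a ≤ cap))).length : Nat) : Int))
        = (g.length : Int) - 1 by omega] at h
    exact h
  unfold innerB canon
  rw [hrun]
  by_cases hn : (g.takeWhile (fun a => decide (a ≤ cap))).length = 0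
  · rw [if_neg (by rw [hn]; rintro ⟨h1, -⟩; omega), if_neg (by rintro ⟨h1, -⟩; exact h1 hn)]
  · have hidx : (((g.takeWhile (fun a => decide (a ≤ cap))).length : Int) - 1)
        = (((g.takeWhile (fun a => decide (a ≤ cap))).length - 1 : Nat) : Int) := by omega
    have hlt : (g.takeWhile (fun a => decide (a ≤ cap))).length - 1 < g.length := by omega
    have hgetd : PySem.List.pyGetD g (((g.takeWhile (fun a => decide (a ≤ cap))).length : Int) - 1) 0
        = g.getD ((g.takeWhile (fun a => decide (a ≤ cap))).length - 1) 0 := by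
      rw [hidx, PySem.List.pyGetD_natCast]
    by_cases hone : 1 ≤ g.getD ((g.takeWhile (fun a => decide (a ≤ cap))).length - 1) 0
    · rw [if_pos ⟨by omega, by rw [hgetd]; exact hone⟩, if_pos ⟨hn, hone⟩]
      rw [hidx, PySem.List.pop?_natCast g ((g.takeWhile (fun a => decide (a ≤ cap))).length - 1) hlt]
      rfl
    · rw [if_neg (by rintro ⟨-, h2⟩; rw [hgetd] at h2; exact hone h2),
        if_neg (by rintro ⟨-, h2⟩; exact hone h2)]

theorem rngScan_eq_canon (g : List Int) (v : Int) (hs : g.Pairwise (· ≤ ·)) (hg : g ≠ []) :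
    ∀ (k : Nat) (w : Int), w ≤ (k : Int) → w ≤ v → (∀ e ∈ g, w < e → v < e) →
    rngScan g (PySem.List.pyRange w 0 (-1)) = canon g v := by
  intro k
  induction k with
  | zero =>
    intro w hk hwv hinv
    rw [PySem.List.pyRange_neg_one_eq_nil (by omega)]
    refine Eq.symm (canon_eq_self_of_nonpos g v ?_)
    intro e he hev
    by_contra hcon
    exact absurd hev (not_le.mpr (hinv e he (by omega)))
  | succ m ih =>
    intro w hk hwv hinv
    by_cases hw0 : w ≤ 0
    · rw [PySem.List.pyRange_neg_one_eq_nil (by omega)]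
      refine Eq.symm (canon_eq_self_of_nonpos g v ?_)
      intro e he hev
      by_contra hcon
      exact absurd hev (not_le.mpr (hinv e he (by omega)))
    · rw [PySem.List.pyRange_neg_one_cons (by omega)]
      simp only [rngScan]
      by_cases hmem : w ∈ g
      · rw [if_pos hmem, PySem.List.remove?_eq_some_erase g w hmem, Option.getD_some]
        set p := g.takeWhile (fun a => decide (a ≤ v)) with hp
        set q := g.dropWhile (fun a => decide (a ≤ v)) with hq
        have hsplit : p ++ q = g := by rw [hp, hq]; exact List.takeWhile_append_dropWhile
        have hqgt : ∀ e ∈ q, v < e := by rw [hq]; exact mem_dropWhile_gt g v hs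
        have hps : p.Pairwise (· ≤ ·) := by rw [hp]; exact takeWhile_pairwise g v hs
        have htk : ∀ e ∈ p, e ≤ v := by rw [hp]; exact fun e he => mem_takeWhile_le g v e he
        clear_value p q
        have hwp : w ∈ p := by
          have hmem' : w ∈ p ++ q := by rw [hsplit]; exact hmem
          rcases List.mem_append.mp hmem' with h | h
          · exact h
          · exact absurd hwv (not_le.mpr (hqgt w h))
        have hpne : p ≠ [] := List.ne_nil_of_mem hwp
        have hallw : ∀ e ∈ p, e ≤ w := by
          intro e he
          by_contra hcon
          exact absurd (htk e he)
            (not_le.mpr (hinv e (hsplit ▸ List.mem_append_left q he) (by omega)))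
        have hlastp : p.getLast hpne = w :=
          le_antisymm (hallw _ (List.getLast_mem hpne)) (le_getLast_of_sorted p hps hpne w hwp)
        have hn : p.length ≠ 0 := by simpa [List.length_eq_zero_iff] using hpne
        have hlhs : g.erase w = p.dropLast ++ q := by
          conv_lhs => rw [← hsplit]
          rw [List.erase_append_left q hwp, ← hlastp, erase_getLast_sorted p hps hpne]
        have hval : g.getD (p.length - 1) 0 = w := by
          rw [getD_prefix ⟨q, hsplit⟩ (by omega), getD_last p hpne]
          exact hlastp
        rw [hlhs]
        unfold canon
        rw [← hp]
        rw [if_pos ⟨hn, by rw [hval]; omega⟩]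
        conv_rhs => rw [← hsplit]
        rw [List.eraseIdx_append_of_lt_length (by omega) q, eraseIdx_last]
      · rw [if_neg hmem]
        rw [PySem.List.pyGetD_zero] at *
        by_cases hge : g.getD 0 0 ≥ w
        · rw [if_pos hge]
          refine Eq.symm (canon_eq_self_of_nonpos g v ?_)
          intro e he hev
          have hmem0 : g.getD 0 0 ∈ g := getD_zero_mem g hg
          have hne0 : g.getD 0 0 ≠ w := fun h0 => hmem (h0 ▸ hmem0)
          have hle := getD_zero_le_of_sorted g hs hg e he
          have := hinv e he (by omega)
          omega
        · rw [if_neg hge]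
          refine ih (w - 1) (by omega) (by omega) ?_
          intro e he hwe
          rcases lt_or_eq_of_le (by omega : w ≤ e) with h | h
          · exact hinv e he h
          · exact absurd (h.symm ▸ he) hmem

theorem removeNotGreaterA_eq_canon (g : List Int) (v : Int) (hs : g.Pairwise (· ≤ ·)) :
    RemoveNotGreaterA g v = canon g v := by
  by_cases hg : g = []
  · subst hg
    simp [RemoveNotGreaterA, canon]
  · rw [RemoveNotGreaterA, if_neg (by simpa [List.length_eq_zero_iff] using hg)]
    exact rngScan_eq_canon g v hs hg v.toNat v (by omega) le_rfl (fun e _ h => h)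

theorem goA_eq_goB (X : Int) : ∀ (fuel : Nat) (fs : List Int) (res : Int),
    fs.Pairwise (· ≤ ·) → solveGoA X fuel fs res = solveGoB X fuel fs res := by
  intro fuel
  induction fuel with
  | zero => intro fs res _; rfl
  | succ k ih =>
    intro fs res hs
    by_cases hfs : fs = []
    · subst hfs; rfl
    · simp only [solveGoA, solveGoB]
      rw [if_neg (by simpa [List.isEmpty_iff] using hfs),
        if_neg (by simpa [List.isEmpty_iff] using hfs)]
      have hrem : (PySem.List.remove? fs (PySem.List.pyGetD fs (-1) 0)).getD fs = fs.dropLast := by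
        rw [PySem.List.pyGetD_neg_one fs 0 hfs,
          PySem.List.remove?_eq_some_erase fs (fs.getLast hfs) (List.getLast_mem hfs),
          Option.getD_some]
        exact erase_getLast_sorted fs hs hfs
      rw [hrem]
      have hs' : fs.dropLast.Pairwise (· ≤ ·) :=
        List.Pairwise.sublist (List.dropLast_sublist fs) hs
      rw [removeNotGreaterA_eq_canon _ _ hs', ← innerB_eq_canon _ _ hs']
      exact ih _ _ (by rw [innerB_eq_canon _ _ hs']; exact canon_pairwise _ _ hs')

-- ===== VERDICT (by name: the statement is the Claim_ definition above) =====
theorem Solve_spec : Claim_equal_Solve := by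
  intro N X fs _
  unfold Spec_Solve Solve Solve_alt
  exact goA_eq_goB X _ _ 0 (by simpa using PySem.List.sorted_pairwise fs id)
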